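-- pv_equiv track=rewrite | github.com/sarospa/project-euler-python | euler-141.py | divisor_sieve
-- ===== SOURCE A (Python) =====
-- import math
--
-- def divisor_sieve(n):
-- 	sieve = [set([i]) for i in range(n + 1)]
-- 	for i in range(2, int(math.sqrt(n)) + 1):
-- 		sieve[i**2].add(i)
-- 		for j in range(i**2 + i, n + 1, i):
-- 			sieve[j].add(i)
-- 			sieve[j].add(j // i)
-- 	return sieve
-- ===== SOURCE B (Python) =====
-- import math
--
-- def divisor_sieve(n):
-- 	return [_divisors(m) for m in range(n + 1)]
--
-- def _divisors(m):
-- 	s = {m}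
-- 	for d in range(2, math.isqrt(m) + 1):
-- 		if m % d == 0:
-- 			s.add(d)
-- 			s.add(m // d)
-- 	return s
-- ===== Notes on version B (the rewrite author's own statement) =====
-- stated objective: alternative
-- what changed: Replaces the shared mutable sieve (one pass over i up to sqrt(n), marking i and the cofactor j//i into every multiple j) by independent per-number trial division: each entry is computed on its own from scratch, no array is mutated.
import Mathlib
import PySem

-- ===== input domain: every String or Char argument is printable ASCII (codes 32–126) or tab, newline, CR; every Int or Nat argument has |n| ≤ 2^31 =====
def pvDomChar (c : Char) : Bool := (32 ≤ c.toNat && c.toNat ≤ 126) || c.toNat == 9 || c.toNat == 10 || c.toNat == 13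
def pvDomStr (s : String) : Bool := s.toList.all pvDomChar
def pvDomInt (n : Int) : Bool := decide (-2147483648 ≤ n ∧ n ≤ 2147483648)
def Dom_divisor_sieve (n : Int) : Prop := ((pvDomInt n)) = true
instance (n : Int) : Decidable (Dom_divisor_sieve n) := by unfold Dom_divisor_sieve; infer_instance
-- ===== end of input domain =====

-- B replaces A's shared-sieve marking pass (one loop over i up to sqrt(n) that adds i and the
-- cofactor j//i into every multiple j of i) by independent per-number trial division; objective:
-- alternative (a genuinely different algorithm of similar cost), return value proved equal.

-- ===== PORT A =====
-- body of the inner 'for j in range(i**2 + i, n + 1, i)' loop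
def pvA_inner (i : Int) (sieve : List (List Int)) (j : Int) : List (List Int) :=
  let sieve := PySem.List.pySetD sieve j (PySem.Set.add (PySem.List.pyGetD sieve j []) i)
  PySem.List.pySetD sieve j (PySem.Set.add (PySem.List.pyGetD sieve j []) (PySem.Int.floordiv j i))

-- body of the outer 'for i in range(2, int(math.sqrt(n)) + 1)' loop
def pvA_outer (n : Int) (sieve : List (List Int)) (i : Int) : List (List Int) :=
  let sieve := PySem.List.pySetD sieve (i * i) (PySem.Set.add (PySem.List.pyGetD sieve (i * i) []) i)
  (PySem.List.pyRange (i * i + i) (n + 1) i).foldl (pvA_inner i) sieve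

-- int(math.sqrt(n)) is ported as Nat.sqrt n.toNat: for nonnegative n up to 2^31 (the stated
-- domain; negative n raise and are excluded by Pre_) the correctly rounded double sqrt rounds to
-- a value whose int() equals the integer square root, so this is exact on the admitted inputs.
def divisor_sieve (n : Int) : List (List Int) :=
  let sieve := (PySem.List.pyRange 0 (n + 1) 1).map (fun i => PySem.Set.ofList [i])
  (PySem.List.pyRange 2 ((n.toNat.sqrt : Int) + 1) 1).foldl (pvA_outer n) sieve

-- ===== PORT B =====
-- body of the 'for d in range(2, math.isqrt(m) + 1)' loop of _divisors
def pvB_step (m : Int) (s : List Int) (d : Int) : List Int :=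
  if PySem.Int.mod m d = 0 then
    PySem.Set.add (PySem.Set.add s d) (PySem.Int.floordiv m d)
  else s

-- _divisors(m)
def pvB_divs (m : Int) : List Int :=
  (PySem.List.pyRange 2 ((m.toNat.sqrt : Int) + 1) 1).foldl (pvB_step m) (PySem.Set.ofList [m])

def divisor_sieve_alt (n : Int) : List (List Int) :=
  (PySem.List.pyRange 0 (n + 1) 1).map pvB_divs

-- ===== PRECONDITION & SPEC =====
-- A raises ValueError on negative n (math.sqrt of a negative number); Pre_ excludes exactly those.
def Pre_divisor_sieve (n : Int) : Prop := 0 ≤ n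
instance (n : Int) : Decidable (Pre_divisor_sieve n) := by unfold Pre_divisor_sieve; infer_instance
def pvWitness_divisor_sieve : Int := 10

def Spec_divisor_sieve (n : Int) (out : List (List Int)) : Prop := out = divisor_sieve_alt n
instance (n : Int) (out : List (List Int)) : Decidable (Spec_divisor_sieve n out) := by unfold Spec_divisor_sieve; infer_instance

-- ===== CLAIM (what is proved, stated in full; the proofs are below) =====
def Claim_equal_divisor_sieve : Prop := ∀ (n : Int), Dom_divisor_sieve n → Pre_divisor_sieve n → Spec_divisor_sieve n (divisor_sieve n)

-- ===== LEMMAS AND PROOFS =====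
-- adding an element already present to a Python set is a no-op
theorem pv_add_of_mem {s : List Int} {x : Int} (h : x ∈ s) : PySem.Set.add s x = s := by
  simp [PySem.Set.add, PySem.Set.contains, h]

-- the effect of one outer iteration of A on the single set at index m, as a pure function
def pvG (i m : Int) (s : List Int) : List Int :=
  if i ∣ m ∧ i * i ≤ m then PySem.Set.add (PySem.Set.add s i) (PySem.Int.floordiv m i) else s

theorem pv_foldl_length {f : List (List Int) → Int → List (List Int)}
    (hf : ∀ sv x, (f sv x).length = sv.length) :
    ∀ (l : List Int) (sv : List (List Int)), (l.foldl f sv).length = sv.length := by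
  intro l
  induction l with
  | nil => intro sv; rfl
  | cons x xs ih => intro sv; simpa [List.foldl_cons, hf] using ih (f sv x)

theorem pvA_inner_length (i : Int) (sv : List (List Int)) (j : Int) :
    (pvA_inner i sv j).length = sv.length := by
  simp [pvA_inner, PySem.List.length_pySetD]

-- one inner-loop step changes only index j, where it adds i and then j//i
theorem pvA_inner_get (i : Int) (sv : List (List Int)) (j : Int) (h0 : 0 ≤ j)
    (h1 : j < (sv.length : Int)) (m : Nat) (hm : m < sv.length) :
    (pvA_inner i sv j)[m]'(by rw [pvA_inner_length]; exact hm) =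
      if j = (m : Int) then
        PySem.Set.add (PySem.Set.add (sv[m]) i) (PySem.Int.floordiv j i)
      else sv[m] := by
  have hj : j.toNat < sv.length := by omega
  have key : ∀ v : List Int, PySem.List.pyGetD (sv.set j.toNat v) j [] = v := fun v => by
    rw [PySem.List.pyGetD_eq_getElem _ _ h0 (by simpa using h1)]
    exact List.getElem_set_self (by simpa using hj)
  simp only [pvA_inner, PySem.List.pySetD_of_nonneg _ _ h0, key,
    PySem.List.pyGetD_eq_getElem sv _ h0 h1, List.set_set, List.getElem_set]
  split_ifs with hA hB hB
  · simp [hA]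
  · omega
  · omega
  · rfl

-- the whole inner loop, pointwise: index m is touched exactly once iff m is among the js
theorem pv_inner_fold_get (i : Int) :
    ∀ (js : List Int) (sv : List (List Int)), js.Nodup →
    (∀ j ∈ js, 0 ≤ j ∧ j < (sv.length : Int)) →
    ∀ (m : Nat) (hm : m < sv.length),
    (js.foldl (pvA_inner i) sv)[m]'(by rw [pv_foldl_length (pvA_inner_length i)]; exact hm) =
      if (m : Int) ∈ js then
        PySem.Set.add (PySem.Set.add (sv[m]) i) (PySem.Int.floordiv (m : Int) i)
      else sv[m] := by
  intro js
  induction js with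
  | nil => intro sv _ _ m hm; simp
  | cons j rest ih =>
    intro sv hnd hb m hm
    have hbj := hb j (List.mem_cons_self)
    have hlen : (pvA_inner i sv j).length = sv.length := pvA_inner_length i sv j
    have hb' : ∀ x ∈ rest, 0 ≤ x ∧ x < ((pvA_inner i sv j).length : Int) := by
      intro x hx; rw [hlen]; exact hb x (List.mem_cons_of_mem _ hx)
    have hrec := ih (pvA_inner i sv j) (List.nodup_cons.mp hnd).2 hb' m (by omega)
    simp only [List.foldl_cons]
    rw [hrec]
    have hget := pvA_inner_get i sv j hbj.1 hbj.2 m hm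
    by_cases hjm : j = (m : Int)
    · have hnotr : (m : Int) ∉ rest := by rw [← hjm]; exact (List.nodup_cons.mp hnd).1
      rw [if_neg hnotr, hget, if_pos hjm, if_pos (by simp [hjm]), hjm]
    · by_cases hmr : (m : Int) ∈ rest
      · rw [if_pos hmr, hget, if_neg hjm, if_pos (List.mem_cons_of_mem _ hmr)]
      · rw [if_neg hmr, hget, if_neg hjm, if_neg (by simp [hmr]; omega)]

theorem pvA_outer_length (n : Int) (sv : List (List Int)) (i : Int) :
    (pvA_outer n sv i).length = sv.length := by
  simp [pvA_outer, pv_foldl_length (pvA_inner_length i), PySem.List.length_pySetD]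

-- one outer iteration acts on index m exactly as pvG i m
theorem pvA_outer_get (n i : Int) (sv : List (List Int)) (hi : 2 ≤ i) (hin : i * i ≤ n)
    (hlen : sv.length = (n + 1).toNat) (m : Nat) (hm : m < sv.length) :
    (pvA_outer n sv i)[m]'(by rw [pvA_outer_length]; exact hm) = pvG i (m : Int) sv[m] := by
  have hipos : (0:Int) < i := by omega
  have hq0 : (0:Int) ≤ i * i := by positivity
  have hq1 : i * i < (sv.length : Int) := by omega
  have hqN : (i * i).toNat < sv.length := by omega
  -- the sieve after the 'sieve[i**2].add(i)' statement
  have hset : PySem.List.pySetD sv (i * i) (PySem.Set.add (PySem.List.pyGetD sv (i * i) []) i)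
      = sv.set (i * i).toNat (PySem.Set.add (sv[(i * i).toNat]'hqN) i) := by
    rw [PySem.List.pySetD_of_nonneg _ _ hq0, PySem.List.pyGetD_eq_getElem _ _ hq0 hq1]
  have hnd : (PySem.List.pyRange (i * i + i) (n + 1) i).Nodup := by
    rw [PySem.List.pyRange_of_pos _ _ hipos]
    exact List.nodup_range.map (fun x y h => by
      have : i * (x:Int) = i * (y:Int) := by omega
      exact_mod_cast mul_left_cancel₀ (by omega) this)
  have hmem : ∀ x : Int, x ∈ PySem.List.pyRange (i * i + i) (n + 1) i ↔
      i * i + i ≤ x ∧ x < n + 1 ∧ i ∣ x - (i * i + i) :=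
    PySem.List.mem_pyRange_iff_of_pos hipos
  have hb : ∀ j ∈ PySem.List.pyRange (i * i + i) (n + 1) i,
      0 ≤ j ∧ j < (((sv.set (i * i).toNat (PySem.Set.add (sv[(i * i).toNat]'hqN) i))).length : Int) := by
    intro j hj
    rcases (hmem j).mp hj with ⟨h1, h2, _⟩
    simp only [List.length_set]
    omega
  have hm' : m < (sv.set (i * i).toNat (PySem.Set.add (sv[(i * i).toNat]'hqN) i)).length := by
    simpa using hm
  have hrec := pv_inner_fold_get i (PySem.List.pyRange (i * i + i) (n + 1) i)
      (sv.set (i * i).toNat (PySem.Set.add (sv[(i * i).toNat]'hqN) i)) hnd hb m hm'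
  simp only [pvA_outer, hset]
  rw [hrec]
  have hsv0 : (sv.set (i * i).toNat (PySem.Set.add (sv[(i * i).toNat]'hqN) i))[m]'hm'
      = if (i * i).toNat = m then PySem.Set.add (sv[m]'hm) i else sv[m]'hm := by
    rw [List.getElem_set]
    split_ifs with h
    · subst h; rfl
    · rfl
  by_cases hqm : (m : Int) = i * i
  · have hnin : (m : Int) ∉ PySem.List.pyRange (i * i + i) (n + 1) i := by
      rw [hmem]; omega
    have hdvd : i ∣ (m : Int) := ⟨i, hqm⟩
    have hfd : PySem.Int.floordiv (m : Int) i = i := by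
      rw [PySem.Int.floordiv_eq_ediv_of_pos hipos, hqm]
      exact Int.mul_ediv_cancel_left _ (by omega)
    rw [if_neg hnin, hsv0, if_pos (by omega), pvG, if_pos ⟨hdvd, by omega⟩, hfd]
    exact (pv_add_of_mem (by rw [PySem.Set.mem_add]; right; rfl)).symm
  · by_cases hmr : (m : Int) ∈ PySem.List.pyRange (i * i + i) (n + 1) i
    · rcases (hmem _).mp hmr with ⟨h1, h2, d, hd⟩
      have hdvd : i ∣ (m : Int) := ⟨i + 1 + d, by linear_combination hd⟩
      rw [if_pos hmr, hsv0, if_neg (by omega), pvG, if_pos ⟨hdvd, by linarith⟩]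
    · rw [if_neg hmr, hsv0, if_neg (by omega), pvG, if_neg ?_]
      rintro ⟨⟨d, hd⟩, hle⟩
      apply hmr
      rw [hmem]
      refine ⟨?_, by omega, ⟨d - i - 1, by linear_combination hd⟩⟩
      have : 0 < (m : Int) - i * i := by omega
      have : i ≤ (m : Int) - i * i :=
        Int.le_of_dvd this (⟨d - i, by linear_combination hd⟩ : i ∣ ((m : Int) - i * i))
      omega

-- the outer loop, pointwise: the sieve entry at m is a fold of pvG over the i-range
theorem pv_outer_fold_get (n : Int) :
    ∀ (is : List Int) (sv : List (List Int)), (∀ i ∈ is, 2 ≤ i ∧ i * i ≤ n) →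
    sv.length = (n + 1).toNat →
    ∀ (m : Nat) (hm : m < sv.length),
    (is.foldl (pvA_outer n) sv)[m]'(by rw [pv_foldl_length (pvA_outer_length n)]; exact hm) =
      is.foldl (fun s i => pvG i (m : Int) s) sv[m] := by
  intro is
  induction is with
  | nil => intro sv _ _ m hm; simp
  | cons i rest ih =>
    intro sv hc hlen m hm
    have hci := hc i (List.mem_cons_self)
    have hlen' : (pvA_outer n sv i).length = sv.length := pvA_outer_length n sv i
    have hrec := ih (pvA_outer n sv i) (fun x hx => hc x (List.mem_cons_of_mem _ hx))
      (by rw [hlen']; exact hlen) m (by omega)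
    simp only [List.foldl_cons]
    rw [hrec, pvA_outer_get n i sv hci.1 hci.2 hlen m hm]

-- extending the i-range beyond sqrt(m) adds no-ops, and below sqrt(m) pvG is B's trial-division step
theorem pv_fold_g_eq_divs (m : Nat) :
    ∀ (t : Nat),
    (PySem.List.pyRange 2 ((m.sqrt : Int) + (t : Int) + 1) 1).foldl
        (fun s i => pvG i (m : Int) s) [(m : Int)] = pvB_divs (m : Int) := by
  intro t
  induction t with
  | zero =>
    simp only [Int.natCast_zero, add_zero]
    unfold pvB_divs
    have hinit : PySem.Set.ofList [(m : Int)] = [(m : Int)] := rfl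
    rw [hinit, Int.toNat_natCast]
    apply PySem.List.foldl_congr_mem
    intro acc i hi
    rcases (PySem.List.mem_pyRange_one).mp hi with ⟨h2, hlt⟩
    have hsq : i * i ≤ (m : Int) := by
      have h1 : i.toNat ≤ m.sqrt := by omega
      have h3 : ((i.toNat : Int)) * (i.toNat : Int) ≤ (m : Int) := by
        exact_mod_cast Nat.le_sqrt.mp h1
      have h4 : ((i.toNat : Int)) = i := by omega
      rw [h4] at h3; exact h3
    by_cases hd : i ∣ (m : Int)
    · simp [pvG, pvB_step, hd, hsq, PySem.Int.mod_eq_zero_iff_dvd]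
    · simp [pvG, pvB_step, hd, PySem.Int.mod_eq_zero_iff_dvd]
  | succ t ih =>
    by_cases h2 : 2 ≤ (m.sqrt : Int) + (t : Int) + 1
    · have hsplit : PySem.List.pyRange 2 ((m.sqrt : Int) + ((t : Nat) + 1 : Nat) + 1) 1 =
          PySem.List.pyRange 2 ((m.sqrt : Int) + (t : Int) + 1) 1 ++ [(m.sqrt : Int) + (t : Int) + 1] := by
        rw [show ((m.sqrt : Int) + ((t : Nat) + 1 : Nat) + 1) = ((m.sqrt : Int) + (t : Int) + 1) + 1 by push_cast; ring]
        exact PySem.List.pyRange_one_succ_right (by omega)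
      rw [hsplit, List.foldl_append]
      have hid : pvG ((m.sqrt : Int) + (t : Int) + 1) (m : Int)
          ((PySem.List.pyRange 2 ((m.sqrt : Int) + (t : Int) + 1) 1).foldl
            (fun s i => pvG i (m : Int) s) [(m : Int)]) =
          (PySem.List.pyRange 2 ((m.sqrt : Int) + (t : Int) + 1) 1).foldl
            (fun s i => pvG i (m : Int) s) [(m : Int)] := by
        unfold pvG
        rw [if_neg]
        rintro ⟨-, hle⟩
        have hlt : (m : Nat) < (m.sqrt + t + 1) * (m.sqrt + t + 1) :=
          Nat.sqrt_lt.mp (by omega)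
        have : ((m : Int)) < ((m.sqrt + t + 1 : Nat) : Int) * ((m.sqrt + t + 1 : Nat) : Int) := by
          exact_mod_cast hlt
        push_cast at this
        nlinarith
      simp only [List.foldl_cons, List.foldl_nil]
      rw [hid, ih]
    · have hK : (m.sqrt : Int) = 0 ∧ (t : Int) = 0 := by omega
      have e1 : PySem.List.pyRange 2 ((m.sqrt : Int) + ((t : Nat) + 1 : Nat) + 1) 1 = [] :=
        PySem.List.pyRange_one_eq_nil (by push_cast; omega)
      have e2 : PySem.List.pyRange 2 (((m : Int).toNat.sqrt : Int) + 1) 1 = [] :=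
        PySem.List.pyRange_one_eq_nil (by rw [Int.toNat_natCast]; omega)
      rw [e1]
      unfold pvB_divs
      rw [e2]
      rfl

theorem pv_main (n : Int) (hpre : (0:Int) ≤ n) : divisor_sieve n = divisor_sieve_alt n := by
  unfold divisor_sieve divisor_sieve_alt
  have hlen0 : ((PySem.List.pyRange 0 (n + 1) 1).map (fun i => PySem.Set.ofList [i])).length
      = (n + 1).toNat := by
    simp [PySem.List.length_pyRange_one]
  have hcond : ∀ i ∈ PySem.List.pyRange 2 ((n.toNat.sqrt : Int) + 1) 1, 2 ≤ i ∧ i * i ≤ n := by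
    intro i hi
    rcases PySem.List.mem_pyRange_one.mp hi with ⟨h2, hlt⟩
    refine ⟨h2, ?_⟩
    have h1 : i.toNat ≤ n.toNat.sqrt := by omega
    have h3 : ((i.toNat : Int)) * (i.toNat : Int) ≤ (n.toNat : Int) := by
      exact_mod_cast Nat.le_sqrt.mp h1
    have h4 : ((i.toNat : Int)) = i := by omega
    rw [h4] at h3; omega
  apply List.ext_getElem
  · rw [pv_foldl_length (pvA_outer_length n)]
    simp [PySem.List.length_pyRange_one]
  · intro m hm1 hm2
    have hm : m < ((PySem.List.pyRange 0 (n + 1) 1).map (fun i => PySem.Set.ofList [i])).length := by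
      rw [pv_foldl_length (pvA_outer_length n)] at hm1; exact hm1
    rw [pv_outer_fold_get n _ _ hcond hlen0 m hm]
    have hmn : m < (n + 1).toNat := by rwa [hlen0] at hm
    have hg0 : ((PySem.List.pyRange 0 (n + 1) 1).map (fun i => PySem.Set.ofList [i]))[m]'hm
        = [(m : Int)] := by
      rw [List.getElem_map, PySem.List.getElem_pyRange_one]
      norm_num
      rfl
    rw [hg0, List.getElem_map, PySem.List.getElem_pyRange_one, zero_add]
    have hms : m ≤ n.toNat := by omega
    have hsq : m.sqrt ≤ n.toNat.sqrt := Nat.sqrt_le_sqrt hms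
    have hb : (n.toNat.sqrt : Int) + 1 = (m.sqrt : Int) + ((n.toNat.sqrt - m.sqrt : Nat) : Int) + 1 := by
      omega
    rw [hb]
    exact pv_fold_g_eq_divs m (n.toNat.sqrt - m.sqrt)

-- ===== VERDICT (by name: the statement is the Claim_ definition above) =====
theorem divisor_sieve_spec : Claim_equal_divisor_sieve :=
  fun n _ hpre => pv_main n hpre
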